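-- pv_equiv track=rewrite | github.com/Shubhamsgupta24/Computer-Networks-and-Security-CNS | MonoalphabeticCipher.py | insert_filler_letters
-- ===== SOURCE A (Python) =====
-- def insert_filler_letters(text):
--     length = len(text)
--     if length % 2 == 0:
--         for i in range(0, length, 2):
--             if text[i] == text[i+1]:
--                 text = text[:i+1] + 'x' + text[i+1:]
--                 return insert_filler_letters(text)
--     else:
--         for i in range(0, length-1, 2):
--             if text[i] == text[i+1]:
--                 text = text[:i+1] + 'x' + text[i+1:]
--                 return insert_filler_letters(text)
--     return text
-- ===== SOURCE B (Python) =====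
-- def insert_filler_letters(text):
--     out = []
--     i = 0
--     n = len(text)
--     while i < n:
--         if i + 1 < n and text[i] == text[i + 1]:
--             out.append(text[i])
--             out.append('x')
--             i += 1
--         elif i + 1 < n:
--             out.append(text[i])
--             out.append(text[i + 1])
--             i += 2
--         else:
--             out.append(text[i])
--             i += 1
--     return ''.join(out)
-- ===== Notes on version B (the rewrite author's own statement) =====
-- stated objective: faster
-- what changed: Replaces A's restart-from-scratch recursion (slice, insert 'x', rescan the whole string from index 0) with a single forward pass over the input that emits the output list directly, advancing by 1 after an equal pair and by 2 otherwise.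
-- outside the precondition, e.g. on insert_filler_letters('axx'): A returns 'axx', B returns 'axx'
import Mathlib
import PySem

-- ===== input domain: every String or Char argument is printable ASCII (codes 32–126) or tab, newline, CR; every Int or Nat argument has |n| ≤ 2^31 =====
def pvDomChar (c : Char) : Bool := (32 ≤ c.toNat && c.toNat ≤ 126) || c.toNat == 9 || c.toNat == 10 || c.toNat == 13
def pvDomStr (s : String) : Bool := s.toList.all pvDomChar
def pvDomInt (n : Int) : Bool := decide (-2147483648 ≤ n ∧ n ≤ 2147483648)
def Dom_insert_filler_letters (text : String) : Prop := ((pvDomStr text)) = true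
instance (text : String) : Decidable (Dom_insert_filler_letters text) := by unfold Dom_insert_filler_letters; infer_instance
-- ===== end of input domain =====

-- B replaces A's restart-from-scratch recursion with one linear forward pass emitting the output directly.


-- ===== PORT A =====
-- A's two for-loops (range(0,length,2) for even length, range(0,length-1,2) for odd) both scan
-- adjacent pairs at even indices and stop before a lone trailing char; findEqA is that scan,
-- returning the first index i with text[i] == text[i+1].
def findEqA : List Char → Nat → Option Nat
  | c1 :: c2 :: rest, i => if c1 = c2 then some i else findEqA rest (i + 2)
  | _, _ => none

-- The Python recursion has no explicit bound; `fuel` only makes it total in Lean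
-- (on inputs satisfying Pre_ the proof shows fuel = length + 1 is never exhausted).
def insertLoopA : Nat → List Char → List Char
  | 0, text => text
  | fuel + 1, text =>
    let length := text.length
    if length % 2 == 0 then
      match findEqA text 0 with
      | some i => insertLoopA fuel (text.take (i + 1) ++ 'x' :: text.drop (i + 1))
      | none => text
    else
      match findEqA text 0 with
      | some i => insertLoopA fuel (text.take (i + 1) ++ 'x' :: text.drop (i + 1))
      | none => text

def insert_filler_letters (text : String) : String :=
  String.ofList (insertLoopA (text.toList.length + 1) text.toList)

-- ===== PORT B =====
-- B's while-loop over index i: equal pair → emit c,'x', i += 1; else pair → emit both, i += 2;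
-- lone last char → emit it.
def scanB : List Char → List Char
  | c1 :: c2 :: rest =>
    if c1 = c2 then c1 :: 'x' :: scanB (c2 :: rest) else c1 :: c2 :: scanB rest
  | l => l
termination_by l => l.length
decreasing_by all_goals (simp; try omega)

def insert_filler_letters_alt (text : String) : String :=
  String.ofList (scanB text.toList)

-- ===== PRECONDITION & SPEC =====
-- Pre_ excludes every text containing the adjacent substring "xx": on such texts A's inserted
-- filler 'x' can recreate the equal pair it was meant to break and A recurses without bound
-- (RecursionError); this is conservative, so it also drops some "xx"-texts on which A does
-- return (e.g. 'axx' — see the cite), where B returns the same value.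
def noXX : List Char → Bool
  | c1 :: c2 :: rest => !(c1 == 'x' && c2 == 'x') && noXX (c2 :: rest)
  | _ => true

def Pre_insert_filler_letters (text : String) : Prop := noXX text.toList = true
instance (text : String) : Decidable (Pre_insert_filler_letters text) := by
  unfold Pre_insert_filler_letters; infer_instance

def pvWitness_insert_filler_letters : String := "hello world"

def Spec_insert_filler_letters (text : String) (out : String) : Prop := out = insert_filler_letters_alt text
instance (text : String) (out : String) : Decidable (Spec_insert_filler_letters text out) := by unfold Spec_insert_filler_letters; infer_instance

-- ===== CLAIM (what is proved, stated in full; the proofs are below) =====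
def Claim_equal_insert_filler_letters : Prop := ∀ (text : String), Dom_insert_filler_letters text → Pre_insert_filler_letters text → Spec_insert_filler_letters text (insert_filler_letters text)

-- ===== LEMMAS AND PROOFS =====

-- even-length prefixes all of whose scanned pairs are unequal
def pairsNe : List Char → Prop
  | c1 :: c2 :: rest => c1 ≠ c2 ∧ pairsNe rest
  | [] => True
  | [_] => False

theorem scanB_nil : scanB [] = [] := by simp [scanB]
theorem scanB_one (c : Char) : scanB [c] = [c] := by simp [scanB]
theorem scanB_cons2 (c1 c2 : Char) (rest : List Char) :
    scanB (c1 :: c2 :: rest) =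
      if c1 = c2 then c1 :: 'x' :: scanB (c2 :: rest) else c1 :: c2 :: scanB rest := by
  rw [scanB]

theorem scanB_none (l : List Char) (i : Nat) (h : findEqA l i = none) : scanB l = l := by
  fun_induction findEqA l i with
  | case1 c rest i => simp at h
  | case2 c1 c2 rest i hc ih =>
    rw [scanB_cons2, if_neg hc, ih h]
  | case3 l i hl =>
    match l with
    | [] => exact scanB_nil
    | [c] => exact scanB_one c
    | c1 :: c2 :: r => exact absurd rfl (hl c1 c2 r)

theorem pairsNe_append2 (p : List Char) (c d : Char) (hp : pairsNe p) (hcd : c ≠ d) :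
    pairsNe (p ++ [c, d]) := by
  match p with
  | [] => exact ⟨hcd, trivial⟩
  | [a] => exact absurd hp (by simp [pairsNe])
  | a :: b :: r => exact ⟨hp.1, pairsNe_append2 r c d hp.2 hcd⟩

theorem scanB_prefix (p t : List Char) (hp : pairsNe p) : scanB (p ++ t) = p ++ scanB t := by
  match p with
  | [] => rfl
  | [c] => exact absurd hp (by simp [pairsNe])
  | c1 :: c2 :: r =>
    obtain ⟨hne, hr⟩ := hp
    simp only [List.cons_append, scanB_cons2, if_neg hne, scanB_prefix r t hr]

theorem findEqA_shift (p : List Char) (hp : pairsNe p) (t : List Char) (i : Nat) :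
    findEqA (p ++ t) i = findEqA t (i + p.length) := by
  match p with
  | [] => simp
  | [c] => exact absurd hp (by simp [pairsNe])
  | c1 :: c2 :: r =>
    obtain ⟨hne, hr⟩ := hp
    simp only [List.cons_append, findEqA, if_neg hne, findEqA_shift r hr t (i + 2)]
    congr 1
    simp; omega

theorem findEqA_ge (l : List Char) (i j : Nat) (h : findEqA l i = some j) : i ≤ j := by
  fun_induction findEqA l i with
  | case1 c rest i => simp at h; omega
  | case2 c1 c2 rest i hc ih => have := ih h; omega
  | case3 l i hl => simp at h

theorem findEqA_decomp (l : List Char) (i j : Nat) (h : findEqA l i = some j) :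
    ∃ p c rest, l = p ++ c :: c :: rest ∧ j = i + p.length ∧ pairsNe p := by
  fun_induction findEqA l i with
  | case1 c rest i =>
    simp at h
    exact ⟨[], c, rest, by simp, by simp [h], trivial⟩
  | case2 c1 c2 rest i hc ih =>
    obtain ⟨p, c, r', hl, hj, hp⟩ := ih h
    exact ⟨c1 :: c2 :: p, c, r', by simp [hl], by simp [hj]; omega, ⟨hc, hp⟩⟩
  | case3 l i hl => simp at h

theorem noXX_tail (a : Char) (t : List Char) (h : noXX (a :: t) = true) : noXX t = true := by
  match t with
  | [] => simp [noXX]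
  | b :: r => simp [noXX] at h ⊢; exact h.2

theorem noXX_ne_x (p : List Char) (c : Char) (rest : List Char)
    (h : noXX (p ++ c :: c :: rest) = true) : c ≠ 'x' := by
  match p with
  | [] =>
    simp only [List.nil_append, noXX, Bool.and_eq_true, Bool.not_eq_true'] at h
    intro hc; subst hc; simp at h
  | a :: p' => exact noXX_ne_x p' c rest (noXX_tail a _ (by simpa using h))

theorem noXX_insert (p : List Char) (c : Char) (rest : List Char)
    (h : noXX (p ++ c :: c :: rest) = true) (hc : c ≠ 'x') :
    noXX (p ++ c :: 'x' :: c :: rest) = true := by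
  match p with
  | [] =>
    simp only [List.nil_append, noXX, Bool.and_eq_true, Bool.not_eq_true'] at h ⊢
    have hcx : (c == 'x') = false := by simp [hc]
    simp [hcx, h.2]
  | a :: p' =>
    have htail := noXX_insert p' c rest (noXX_tail a _ (by simpa using h)) hc
    match p' with
    | [] =>
      simp only [List.nil_append] at htail
      simp only [List.cons_append, List.nil_append, noXX, Bool.and_eq_true,
        Bool.not_eq_true'] at h ⊢
      have hcx : (c == 'x') = false := by simp [hc]
      simp only [noXX, Bool.and_eq_true, Bool.not_eq_true'] at htail
      simp [hcx, htail.2.2]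
    | b :: p'' =>
      simp only [List.cons_append, noXX, Bool.and_eq_true] at h ⊢
      exact ⟨h.1, by simpa using htail⟩

theorem insertLoopA_succ (fuel : Nat) (text : List Char) :
    insertLoopA (fuel + 1) text =
      match findEqA text 0 with
      | some i => insertLoopA fuel (text.take (i + 1) ++ 'x' :: text.drop (i + 1))
      | none => text := by
  rw [insertLoopA]
  split <;> rfl

theorem insertLoopA_eq_scanB (fuel : Nat) (l : List Char) (hx : noXX l = true)
    (hb : ∀ j, findEqA l 0 = some j → l.length ≤ fuel + j) (hf : 0 < fuel) :
    insertLoopA fuel l = scanB l := by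
  match fuel with
  | 0 => omega
  | f + 1 =>
    rw [insertLoopA_succ]
    cases h : findEqA l 0 with
    | none => exact (scanB_none l 0 h).symm
    | some j =>
      obtain ⟨p, c, rest, hl, hj, hp⟩ := findEqA_decomp l 0 j h
      have hj' : j = p.length := by omega
      subst hl hj'
      have hc : c ≠ 'x' := noXX_ne_x p c rest hx
      have hlen : (p ++ c :: c :: rest).length = p.length + 2 + rest.length := by simp; omega
      have htake : (p ++ c :: c :: rest).take (p.length + 1) = p ++ [c] := by
        rw [List.take_append]
        simp
      have hdrop : (p ++ c :: c :: rest).drop (p.length + 1) = c :: rest := by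
        rw [List.drop_append]
        simp
      dsimp only
      rw [htake, hdrop]
      have hform : (p ++ [c]) ++ 'x' :: c :: rest = p ++ c :: 'x' :: c :: rest := by simp
      rw [hform]
      have hbound := hb _ h
      have hx' : noXX (p ++ c :: 'x' :: c :: rest) = true := noXX_insert p c rest hx hc
      have hb' : ∀ j', findEqA (p ++ c :: 'x' :: c :: rest) 0 = some j' →
          (p ++ c :: 'x' :: c :: rest).length ≤ f + j' := by
        intro j' hj'
        have hpc : pairsNe (p ++ [c, 'x']) := pairsNe_append2 p c 'x' hp hc
        have : findEqA (p ++ c :: 'x' :: c :: rest) 0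
            = findEqA (c :: rest) (0 + (p ++ [c, 'x']).length) := by
          have : p ++ c :: 'x' :: c :: rest = (p ++ [c, 'x']) ++ c :: rest := by simp
          rw [this, findEqA_shift _ hpc]
        rw [this] at hj'
        have hge := findEqA_ge _ _ _ hj'
        simp at hge
        simp
        omega
      have hf' : 0 < f := by
        simp at hbound
        omega
      rw [insertLoopA_eq_scanB f _ hx' hb' hf']
      rw [scanB_prefix p _ hp, scanB_prefix p _ hp]
      rw [scanB_cons2 c 'x', if_neg hc, scanB_cons2 c c, if_pos rfl]

-- ===== VERDICT (by name: the statement is the Claim_ definition above) =====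
theorem insert_filler_letters_spec : Claim_equal_insert_filler_letters := by
  intro text _ hpre
  unfold Spec_insert_filler_letters insert_filler_letters insert_filler_letters_alt
  congr 1
  exact insertLoopA_eq_scanB _ _ hpre (fun j hj => by omega) (by omega)
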